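-- pv_equiv track=rewrite | github.com/rcasteran/jarvis4se | src/jarvis/query/question_answer.py | merge_list_per_cons_prod
-- ===== SOURCE A (Python) =====
-- def merge_list_per_cons_prod(input_list):
--     """
--     Sorts data_name in alphabetical order according to their name and merges list by producer or consumer
--     Args:
--         input_list ([data_name, function_name]): List of consumer/producer with data_name per Function
--
--     Returns:
--         Sorted + merged list
--     """
--     input_list = sorted(input_list)
--     output_list = []
--     empty_dict = {}
--     for data_name, obj_name in input_list:
--         if data_name not in empty_dict:
--             output_list.append([data_name, obj_name])
--             empty_dict[data_name] = len(empty_dict)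
--         else:
--             if obj_name:
--                 if obj_name not in output_list[empty_dict[data_name]][1]:
--                     output_list[empty_dict[data_name]][1] += '\\n' + obj_name
--
--     return output_list
-- ===== SOURCE B (Python) =====
-- def merge_list_per_cons_prod(input_list):
--     """Single pass over the sorted list with a current-group accumulator:
--     no index dictionary and no in-place edits of already-emitted rows."""
--     output_list = []
--     cur = None  # (data_name, accumulated obj_names) of the group being built
--     for data_name, obj_name in sorted(input_list):
--         if cur is None:
--             cur = (data_name, obj_name)
--         elif data_name != cur[0]:
--             output_list.append([cur[0], cur[1]])
--             cur = (data_name, obj_name)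
--         elif obj_name and obj_name not in cur[1]:
--             cur = (cur[0], cur[1] + '\\n' + obj_name)
--     if cur is not None:
--         output_list.append([cur[0], cur[1]])
--     return output_list
-- ===== Notes on version B (the rewrite author's own statement) =====
-- stated objective: simpler
-- what changed: B replaces A's index dictionary and in-place edits of already-appended rows by a single pass over the sorted list that keeps only the current group's (name, accumulator) pair and emits each group once at its boundary.
import Mathlib
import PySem

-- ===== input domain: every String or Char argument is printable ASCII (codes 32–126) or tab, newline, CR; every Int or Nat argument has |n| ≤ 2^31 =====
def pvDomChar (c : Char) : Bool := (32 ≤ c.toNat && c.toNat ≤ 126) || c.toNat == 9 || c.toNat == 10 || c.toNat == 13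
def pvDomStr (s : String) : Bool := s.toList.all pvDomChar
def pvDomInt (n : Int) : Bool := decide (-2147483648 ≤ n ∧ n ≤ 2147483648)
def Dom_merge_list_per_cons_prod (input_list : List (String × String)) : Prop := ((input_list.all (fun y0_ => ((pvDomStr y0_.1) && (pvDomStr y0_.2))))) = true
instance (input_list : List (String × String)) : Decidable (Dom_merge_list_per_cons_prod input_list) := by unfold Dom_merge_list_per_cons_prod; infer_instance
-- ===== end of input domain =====

-- B replaces A's index dictionary + in-place row edits by one pass over the sorted
-- list keeping only the current group's accumulator (objective: simpler).
-- Note: the separator is the two-character string "\\n", exactly as in the Python source.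

-- ===== PORT A =====
-- the for-loop of A over the sorted list; state: output_list and the name→index dict
def mergeA_loop : List (String × String) → List (List String) → PySem.Dict String Int → List (List String)
  | [], output_list, _ => output_list
  | (data_name, obj_name) :: rest, output_list, empty_dict =>
    match empty_dict.get? data_name with
    | none =>
        mergeA_loop rest (output_list ++ [[data_name, obj_name]])
          (empty_dict.insert data_name (empty_dict.size : Int))
    | some i =>
        if obj_name ≠ "" then
          -- the dict always stores a valid nonnegative index, so pyGetD/toNat are exact here
          let row := PySem.List.pyGetD output_list i []
          let acc := PySem.List.pyGetD row 1 ""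
          if PySem.Str.isIn obj_name acc then
            mergeA_loop rest output_list empty_dict
          else
            mergeA_loop rest (output_list.set i.toNat (row.set 1 (acc ++ "\\n" ++ obj_name))) empty_dict
        else
          mergeA_loop rest output_list empty_dict

def merge_list_per_cons_prod (input_list : List (String × String)) : List (List String) :=
  mergeA_loop (PySem.List.sorted2 input_list Prod.fst Prod.snd) [] PySem.Dict.empty

-- ===== PORT B =====
-- B's for-loop: output so far and the current group (name, accumulator), if any
def mergeB_loop : List (String × String) → List (List String) → Option (String × String) → List (List String)
  | [], output_list, cur =>
    match cur with
    | none => output_list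
    | some (k, a) => output_list ++ [[k, a]]
  | (data_name, obj_name) :: rest, output_list, cur =>
    match cur with
    | none => mergeB_loop rest output_list (some (data_name, obj_name))
    | some (k, a) =>
        if data_name ≠ k then
          mergeB_loop rest (output_list ++ [[k, a]]) (some (data_name, obj_name))
        else if obj_name ≠ "" ∧ ¬ PySem.Str.isIn obj_name a then
          mergeB_loop rest output_list (some (k, a ++ "\\n" ++ obj_name))
        else
          mergeB_loop rest output_list cur

def merge_list_per_cons_prod_alt (input_list : List (String × String)) : List (List String) :=
  mergeB_loop (PySem.List.sorted2 input_list Prod.fst Prod.snd) [] none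

-- ===== PRECONDITION & SPEC =====
def Spec_merge_list_per_cons_prod (input_list : List (String × String)) (out : List (List String)) : Prop := out = merge_list_per_cons_prod_alt input_list
instance (input_list : List (String × String)) (out : List (List String)) : Decidable (Spec_merge_list_per_cons_prod input_list out) := by unfold Spec_merge_list_per_cons_prod; infer_instance

-- ===== CLAIM (what is proved, stated in full; the proofs are below) =====
def Claim_equal_merge_list_per_cons_prod : Prop := ∀ (input_list : List (String × String)), Dom_merge_list_per_cons_prod input_list → Spec_merge_list_per_cons_prod input_list (merge_list_per_cons_prod input_list)

-- ===== LEMMAS AND PROOFS =====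

-- sorted2 sorts by (fst, snd), so in particular the first components come out nondecreasing
lemma insertBy2_pairwise_fst (x : String × String) (ys : List (String × String))
    (h : ys.Pairwise (fun a b => a.1 ≤ b.1)) :
    (PySem.List.insertBy
      (fun a b => decide (a.1 < b.1) || (!decide (b.1 < a.1) && decide (a.2 < b.2))) x ys).Pairwise
      (fun a b => a.1 ≤ b.1) := by
  induction ys with
  | nil => simp [PySem.List.insertBy]
  | cons y ys ih =>
    rw [List.pairwise_cons] at h
    unfold PySem.List.insertBy
    by_cases hb : (decide (x.1 < y.1) || (!decide (y.1 < x.1) && decide (x.2 < y.2))) = true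
    · simp only [hb, if_pos]
      have hxy : x.1 ≤ y.1 := by
        simp only [Bool.or_eq_true, Bool.and_eq_true, Bool.not_eq_true', decide_eq_true_eq,
          decide_eq_false_iff_not] at hb
        rcases hb with h1 | ⟨h1, _⟩
        · exact le_of_lt h1
        · exact le_of_not_gt h1
      refine List.pairwise_cons.mpr ⟨?_, List.pairwise_cons.mpr h⟩
      intro b hb'
      rcases List.mem_cons.mp hb' with rfl | hb'
      · exact hxy
      · exact le_trans hxy (h.1 b hb')
    · simp only [hb, if_neg, Bool.false_eq_true, not_false_iff]
      have hyx : y.1 ≤ x.1 := by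
        simp only [Bool.or_eq_true, Bool.and_eq_true, Bool.not_eq_true', decide_eq_true_eq,
          decide_eq_false_iff_not, not_or, not_and] at hb
        by_contra hlt
        exact hb.1 (lt_of_not_ge hlt)
      refine List.pairwise_cons.mpr ⟨?_, ih h.2⟩
      intro b hb'
      rcases (PySem.List.mem_insertBy _ _ _ _).mp hb' with rfl | hb'
      · exact hyx
      · exact h.1 b hb'

lemma sorted2_pairwise_fst (xs : List (String × String)) :
    (PySem.List.sorted2 xs Prod.fst Prod.snd).Pairwise (fun a b => a.1 ≤ b.1) := by
  unfold PySem.List.sorted2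
  simp only []
  induction xs using List.reverseRecOn with
  | nil => simp
  | append_singleton xs x ih =>
    rw [List.foldl_append, List.foldl_cons, List.foldl_nil]
    exact insertBy2_pairwise_fst x _ ih

-- main loop correspondence on a fst-sorted tail:
-- A's state is B's output plus the current group as its last row, with the dict
-- mapping the current (maximal) name to that last index
lemma loop_eq (rest : List (String × String)) :
    ∀ (outB : List (List String)) (k a : String) (d : PySem.Dict String Int),
    (∀ p ∈ rest, k ≤ p.1) →
    d.get? k = some (outB.length : Int) →
    (∀ x : String, k < x → d.get? x = none) →
    d.size = outB.length + 1 →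
    rest.Pairwise (fun p q => p.1 ≤ q.1) →
    mergeA_loop rest (outB ++ [[k, a]]) d = mergeB_loop rest outB (some (k, a)) := by
  induction rest with
  | nil => intro _ _ _ _ _ _ _ _ _; simp [mergeA_loop, mergeB_loop]
  | cons p rest ih =>
    intro outB k a d hge hk hnone hsize hpw
    obtain ⟨dn, on_⟩ := p
    have hkdn : k ≤ dn := hge (dn, on_) (List.mem_cons_self ..)
    rw [List.pairwise_cons] at hpw
    have hge' : ∀ q ∈ rest, dn ≤ q.1 := fun q hq => hpw.1 q hq
    by_cases hdk : dn = k
    · subst hdk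
      have hrow : PySem.List.pyGetD (outB ++ [[dn, a]]) ((outB.length : Int)) [] = [dn, a] := by
        rw [PySem.List.pyGetD_natCast]
        simp
      have hacc : PySem.List.pyGetD ([dn, a] : List String) 1 "" = a := rfl
      have hset : (outB ++ [[dn, a]]).set ((outB.length : Int)).toNat
          (([dn, a] : List String).set 1 (a ++ "\\n" ++ on_)) = outB ++ [[dn, a ++ "\\n" ++ on_]] := by
        simp
      simp only [mergeA_loop, mergeB_loop, hk, hrow, hacc, hset, ne_eq, not_true_eq_false,
        if_false]
      split_ifs <;>
        first
          | exact ih outB dn a d hge' hk hnone hsize hpw.2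
          | exact ih outB dn (a ++ "\\n" ++ on_) d hge' hk hnone hsize hpw.2
          | tauto
    · have hlt : k < dn := lt_of_le_of_ne hkdn (fun h => hdk h.symm)
      have hdnone : d.get? dn = none := hnone dn hlt
      simp only [mergeA_loop, mergeB_loop, hdnone]
      rw [if_pos hdk]
      have := ih (outB ++ [[k, a]]) dn on_ (d.insert dn (d.size : Int)) hge'
        (by rw [PySem.Dict.get?_insert_self]; simp [hsize])
        (by intro x hx
            rw [PySem.Dict.get?_insert_of_ne _ _ (ne_of_gt hx)]
            exact hnone x (lt_trans hlt hx))
        (by rw [PySem.Dict.size_insert]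
            simp [PySem.Dict.contains_eq_isSome_get?, hdnone, hsize])
        hpw.2
      simpa using this

-- ===== VERDICT (by name: the statement is the Claim_ definition above) =====
theorem merge_list_per_cons_prod_spec : Claim_equal_merge_list_per_cons_prod := by
  intro input_list _
  unfold Spec_merge_list_per_cons_prod merge_list_per_cons_prod merge_list_per_cons_prod_alt
  have hpw := sorted2_pairwise_fst input_list
  cases hs : PySem.List.sorted2 input_list Prod.fst Prod.snd with
  | nil => simp [mergeA_loop, mergeB_loop]
  | cons p rest =>
    obtain ⟨dn, on_⟩ := p
    rw [hs] at hpw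
    rw [List.pairwise_cons] at hpw
    simp only [mergeA_loop, mergeB_loop, PySem.Dict.get?_empty]
    have := loop_eq rest [] dn on_ (PySem.Dict.empty.insert dn 0)
      (fun q hq => hpw.1 q hq)
      (by rw [PySem.Dict.get?_insert_self]; rfl)
      (by intro x hx
          rw [PySem.Dict.get?_insert_of_ne _ _ (ne_of_gt hx)]
          exact PySem.Dict.get?_empty x)
      (by rw [PySem.Dict.size_insert]; simp [PySem.Dict.contains_empty])
      hpw.2
    simpa using this
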